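-- pv_equiv track=rewrite | github.com/jasonmayday/LeetCode | leetcode_cup/1_easy/LCP_39_无人机方阵.py | minimumSwitchingTimes
-- ===== SOURCE A (Python) =====
-- from typing import List
--
-- def minimumSwitchingTimes(source: List[List[int]], target: List[List[int]]) -> int:
--     dict = {}
--     for i in source:
--         for j in i:
--             if j not in dict:
--                 dict[j] = 0
--             dict[j] += 1
--     ans = 0
--     for i in target:
--         for j in i:
--             if j not in dict:
--                 ans += 1
--             elif dict[j] > 0:
--                 dict[j] -= 1
--             else:
--                 ans += 1
--     return ans
-- ===== SOURCE B (Python) =====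
-- from typing import List
--
-- def minimumSwitchingTimes(source: List[List[int]], target: List[List[int]]) -> int:
--     cs = {}
--     for row in source:
--         for v in row:
--             cs[v] = cs.get(v, 0) + 1
--     ct = {}
--     for row in target:
--         for v in row:
--             ct[v] = ct.get(v, 0) + 1
--     return sum(max(0, n - cs.get(v, 0)) for v, n in ct.items())
-- ===== Notes on version B (the rewrite author's own statement) =====
-- stated objective: alternative
-- what changed: Builds complete frequency tables of source and target up front and returns the sum of the positive residuals count(target,v)-count(source,v) over the distinct target values, instead of A's destructive match-as-you-go scan that decrements a shared availability dict while walking target.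
import Mathlib
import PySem

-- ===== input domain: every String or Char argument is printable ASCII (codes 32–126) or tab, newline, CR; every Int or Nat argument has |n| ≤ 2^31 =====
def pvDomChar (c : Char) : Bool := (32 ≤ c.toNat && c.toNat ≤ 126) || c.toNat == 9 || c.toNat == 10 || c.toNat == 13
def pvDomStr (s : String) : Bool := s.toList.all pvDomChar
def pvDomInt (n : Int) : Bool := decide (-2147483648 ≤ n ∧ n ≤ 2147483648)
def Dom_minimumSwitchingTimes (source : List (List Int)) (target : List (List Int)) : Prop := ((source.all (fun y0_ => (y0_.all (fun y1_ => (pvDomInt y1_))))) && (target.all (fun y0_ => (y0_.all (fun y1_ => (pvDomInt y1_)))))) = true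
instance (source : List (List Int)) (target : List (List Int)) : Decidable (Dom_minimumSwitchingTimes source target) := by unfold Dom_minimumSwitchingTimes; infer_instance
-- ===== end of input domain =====

-- B builds complete frequency tables of source and target up front and sums the
-- positive per-value residuals, instead of A's destructive match-as-you-go scan
-- (objective: alternative).

-- ===== PORT A =====
-- first loop body: 'if j not in dict: dict[j] = 0 ; dict[j] += 1'
def pvBuildStep (d : PySem.Dict Int Int) (j : Int) : PySem.Dict Int Int :=
  let d := if d.contains j then d else d.insert j 0
  d.modify j 0 (· + 1)

-- second loop body over state (dict, ans)
def pvMatchStep (s : PySem.Dict Int Int × Int) (j : Int) : PySem.Dict Int Int × Int :=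
  if ¬ s.1.contains j then (s.1, s.2 + 1)
  else if s.1.getD j 0 > 0 then (s.1.modify j 0 (· - 1), s.2)
  else (s.1, s.2 + 1)

def minimumSwitchingTimes (source : List (List Int)) (target : List (List Int)) : Int :=
  let d := source.foldl (fun d i => i.foldl pvBuildStep d) PySem.Dict.empty
  let st := target.foldl (fun s i => i.foldl pvMatchStep s) (d, (0 : Int))
  st.2

-- ===== PORT B =====
-- 'cs[v] = cs.get(v, 0) + 1'
def pvCountStep (d : PySem.Dict Int Int) (v : Int) : PySem.Dict Int Int :=
  d.insert v (d.getD v 0 + 1)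

def minimumSwitchingTimes_alt (source : List (List Int)) (target : List (List Int)) : Int :=
  let cs := source.foldl (fun d row => row.foldl pvCountStep d) PySem.Dict.empty
  let ct := target.foldl (fun d row => row.foldl pvCountStep d) PySem.Dict.empty
  (ct.items.map (fun p => max 0 (p.2 - cs.getD p.1 0))).sum

-- ===== PRECONDITION & SPEC =====
def Spec_minimumSwitchingTimes (source : List (List Int)) (target : List (List Int)) (out : Int) : Prop := out = minimumSwitchingTimes_alt source target
instance (source : List (List Int)) (target : List (List Int)) (out : Int) : Decidable (Spec_minimumSwitchingTimes source target out) := by unfold Spec_minimumSwitchingTimes; infer_instance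

-- ===== CLAIM (what is proved, stated in full; the proofs are below) =====
def Claim_equal_minimumSwitchingTimes : Prop := ∀ (source : List (List Int)) (target : List (List Int)), Dom_minimumSwitchingTimes source target → Spec_minimumSwitchingTimes source target (minimumSwitchingTimes source target)

-- ===== LEMMAS AND PROOFS =====

-- one build step bumps the stored count of j by one (default 0)
theorem pvBuildStep_getD (d : PySem.Dict Int Int) (j v : Int) :
    (pvBuildStep d j).getD v 0 = d.getD v 0 + (if v = j then 1 else 0) := by
  unfold pvBuildStep
  have hins : ∀ w, ((if d.contains j then d else d.insert j 0)).getD w 0 = d.getD w 0 := by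
    intro w
    by_cases hc : d.contains j = true
    · simp [hc]
    · by_cases h : w = j
      · subst h
        simp [hc, PySem.Dict.getD_of_not_contains d 0 (by simpa using hc)]
      · simp [hc, PySem.Dict.getD_insert, h]
  rw [PySem.Dict.getD_modify, hins, hins]
  split_ifs with h
  · rw [h]
  · rw [add_zero]

-- the build fold computes occurrence counts
theorem pvBuild_getD (l : List Int) (d : PySem.Dict Int Int) (v : Int) :
    (l.foldl pvBuildStep d).getD v 0 = d.getD v 0 + (l.count v : Int) := by
  induction l generalizing d with
  | nil => simp
  | cons j t ih =>
      rw [List.foldl_cons, ih, pvBuildStep_getD]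
      by_cases h : v = j
      · rw [h, List.count_cons_self, if_pos rfl]
        push_cast; ring
      · rw [List.count_cons_of_ne (Ne.symm h), if_neg h, add_zero]

-- the match fold, abstracted over the availability function c
theorem pvMatch_foldl (t : List Int) : ∀ (d : PySem.Dict Int Int) (ans : Int) (c : Int → Int),
    (∀ v, d.getD v 0 = c v) → (∀ v, 0 ≤ c v) →
    (t.foldl pvMatchStep (d, ans)).2
      = ans + ∑ v ∈ t.toFinset, max 0 ((t.count v : Int) - c v) := by
  induction t with
  | nil => intro d ans c _ _; simp
  | cons j t ih =>
      intro d ans c hdc hc0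
      have hins : (j :: t).toFinset = insert j t.toFinset := by simp
      by_cases hpos : 0 < c j
      · -- available: dict decrements at j, availability drops by one
        have hcont : d.contains j = true := by
          by_contra hnc
          have h0 : d.getD j 0 = 0 :=
            PySem.Dict.getD_of_not_contains d 0 (by simpa using hnc)
          rw [hdc j] at h0; omega
        have hstep : pvMatchStep (d, ans) j = (d.modify j 0 (· - 1), ans) := by
          unfold pvMatchStep
          simp [hcont, hdc j, hpos]
        rw [List.foldl_cons, hstep,
          ih (d.modify j 0 (· - 1)) ans (fun v => if v = j then c j - 1 else c v)
            (by
              intro v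
              rw [PySem.Dict.getD_modify]
              dsimp only
              split_ifs with h
              · rw [hdc j]
              · exact hdc v)
            (by
              intro v
              dsimp only
              split_ifs with h
              · omega
              · exact hc0 v)]
        congr 1
        rw [hins]
        by_cases hjt : j ∈ t
        · have hmem : j ∈ insert j t.toFinset := Finset.mem_insert_self j t.toFinset
          have hmem' : j ∈ t.toFinset := List.mem_toFinset.mpr hjt
          rw [← Finset.add_sum_erase _ _ hmem, ← Finset.add_sum_erase _ _ hmem',
            Finset.erase_insert_eq_erase]
          have h1 : max 0 (((j :: t).count j : Int) - c j)
              = max 0 ((t.count j : Int) - (c j - 1)) := by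
            congr 1
            rw [List.count_cons_self]
            push_cast; ring
          have h2 : ∀ x ∈ t.toFinset.erase j,
              max 0 (((j :: t).count x : Int) - c x)
                = max 0 ((t.count x : Int) - if x = j then c j - 1 else c x) := by
            intro x hx
            have hxj : x ≠ j := Finset.ne_of_mem_erase hx
            rw [List.count_cons_of_ne (Ne.symm hxj), if_neg hxj]
          rw [h1, Finset.sum_congr rfl h2]
          simp
        · have hjt' : j ∉ t.toFinset := by simpa using hjt
          rw [Finset.sum_insert hjt']
          have h1 : max 0 (((j :: t).count j : Int) - c j) = 0 := by
            have h0 : t.count j = 0 := List.count_eq_zero_of_not_mem hjt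
            rw [List.count_cons_self, h0]
            apply max_eq_left
            push_cast; omega
          have h2 : ∀ x ∈ t.toFinset,
              max 0 (((j :: t).count x : Int) - c x)
                = max 0 ((t.count x : Int) - if x = j then c j - 1 else c x) := by
            intro x hx
            have hxj : x ≠ j := by rintro rfl; exact hjt' hx
            rw [List.count_cons_of_ne (Ne.symm hxj), if_neg hxj]
          rw [h1, Finset.sum_congr rfl h2]
          simp
      · -- unavailable (count 0): ans += 1, dict unchanged
        have hcj : c j = 0 := le_antisymm (by omega) (hc0 j)
        have hstep : pvMatchStep (d, ans) j = (d, ans + 1) := by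
          unfold pvMatchStep
          by_cases hcont : d.contains j = true
          · simp [hcont, hdc j, hcj]
          · simp [hcont]
        rw [List.foldl_cons, hstep, ih d (ans + 1) c hdc hc0]
        have key : ∑ v ∈ (j :: t).toFinset, max 0 (((j :: t).count v : Int) - c v)
            = 1 + ∑ v ∈ t.toFinset, max 0 ((t.count v : Int) - c v) := by
          rw [hins]
          by_cases hjt : j ∈ t
          · have hmem : j ∈ insert j t.toFinset := Finset.mem_insert_self j t.toFinset
            have hmem' : j ∈ t.toFinset := List.mem_toFinset.mpr hjt
            rw [← Finset.add_sum_erase _ _ hmem, ← Finset.add_sum_erase _ _ hmem',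
              Finset.erase_insert_eq_erase]
            have hcnt : (0 : Int) ≤ (t.count j : Int) := by positivity
            have h1 : max 0 (((j :: t).count j : Int) - c j)
                = 1 + max 0 ((t.count j : Int) - c j) := by
              rw [List.count_cons_self, hcj]
              rw [max_eq_right (by omega), max_eq_right (by omega)]
              push_cast; ring
            have h2 : ∀ x ∈ t.toFinset.erase j,
                max 0 (((j :: t).count x : Int) - c x)
                  = max 0 ((t.count x : Int) - c x) := by
              intro x hx
              rw [List.count_cons_of_ne (Ne.symm (Finset.ne_of_mem_erase hx))]
            rw [h1, Finset.sum_congr rfl h2]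
            ring
          · have hjt' : j ∉ t.toFinset := by simpa using hjt
            rw [Finset.sum_insert hjt']
            have h1 : max 0 (((j :: t).count j : Int) - c j) = 1 := by
              have h0 : t.count j = 0 := List.count_eq_zero_of_not_mem hjt
              rw [List.count_cons_self, h0, hcj]
              simp
            have h2 : ∀ x ∈ t.toFinset,
                max 0 (((j :: t).count x : Int) - c x)
                  = max 0 ((t.count x : Int) - c x) := by
              intro x hx
              have hxj : x ≠ j := by rintro rfl; exact hjt' hx
              rw [List.count_cons_of_ne (Ne.symm hxj)]
            rw [h1, Finset.sum_congr rfl h2]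
        rw [key]; ring

-- B's per-distinct-value residual sum as a Finset sum
theorem pvAlt_eq_finset (src tgt : List Int) :
    ((((tgt.foldl pvCountStep PySem.Dict.empty).items).map
        (fun p => max 0 (p.2 - (src.foldl pvCountStep PySem.Dict.empty).getD p.1 0)))).sum
      = ∑ v ∈ tgt.toFinset, max 0 ((tgt.count v : Int) - (src.count v : Int)) := by
  have hsrc : ∀ k, (src.foldl pvCountStep PySem.Dict.empty).getD k 0 = (src.count k : Int) := by
    intro k
    unfold pvCountStep
    rw [PySem.Dict.getD_foldl_insert_add_one, PySem.Dict.getD_empty, zero_add]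
  have hct : (tgt.foldl pvCountStep PySem.Dict.empty).items
      = (PySem.Set.ofList tgt).map (fun k => (k, (tgt.count k : Int))) := by
    unfold pvCountStep
    rw [PySem.Dict.foldl_insert_getD_add_one_eq_counter, PySem.Dict.items_counter]
  rw [hct, List.map_map]
  have hbody : ∀ k,
      ((fun p : Int × Int => max 0 (p.2 - (src.foldl pvCountStep PySem.Dict.empty).getD p.1 0)) ∘
        (fun k => (k, (tgt.count k : Int)))) k
      = max 0 ((tgt.count k : Int) - (src.count k : Int)) := by
    intro k
    simp [Function.comp, hsrc k]
  rw [List.map_congr_left (fun k _ => hbody k),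
    ← List.sum_toFinset _ (PySem.Set.nodup_ofList tgt)]
  apply Finset.sum_congr
  · ext v
    simp [PySem.Set.mem_ofList]
  · intro _ _; rfl

-- ===== VERDICT (by name: the statement is the Claim_ definition above) =====
theorem minimumSwitchingTimes_spec : Claim_equal_minimumSwitchingTimes := by
  intro source target _
  unfold Spec_minimumSwitchingTimes minimumSwitchingTimes minimumSwitchingTimes_alt
  simp only [← List.foldl_flatten]
  rw [pvMatch_foldl (target.flatten) _ 0 (fun v => ((source.flatten).count v : Int))
      (by
        intro v
        rw [pvBuild_getD, PySem.Dict.getD_empty]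
        ring)
      (by intro v; positivity)]
  rw [pvAlt_eq_finset]
  ring
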